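-- pv_equiv track=rewrite | github.com/SARAD-GmbH/RegServer | src/regserver/helpers.py | diff_of_dicts
-- ===== SOURCE A (Python) =====
-- def diff_of_dicts(dict1, dict2):
--     """Get difference of two dictionaries."""
--     set1 = set(dict1.keys())
--     set2 = set(dict2.keys())
--     diff = set1 - set2
--     diff_dict = {}
--     for key in diff:
--         if key in dict1:
--             diff_dict[key] = dict1[key]
--     return diff_dict
-- ===== SOURCE B (Python) =====
-- def diff_of_dicts(dict1, dict2):
--     """Get difference of two dictionaries."""
--     result = dict(dict1)
--     for key in dict2:
--         result.pop(key, None)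
--     return result
-- ===== Notes on version B (the rewrite author's own statement) =====
-- stated objective: alternative
-- what changed: Replaced A's select-into-a-new-dict strategy (build both key sets, subtract, then re-scan the difference with lookups into dict1) by the dual copy-and-delete strategy: copy dict1 once and iterate dict2, popping each of its keys from the copy.
import Mathlib
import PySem

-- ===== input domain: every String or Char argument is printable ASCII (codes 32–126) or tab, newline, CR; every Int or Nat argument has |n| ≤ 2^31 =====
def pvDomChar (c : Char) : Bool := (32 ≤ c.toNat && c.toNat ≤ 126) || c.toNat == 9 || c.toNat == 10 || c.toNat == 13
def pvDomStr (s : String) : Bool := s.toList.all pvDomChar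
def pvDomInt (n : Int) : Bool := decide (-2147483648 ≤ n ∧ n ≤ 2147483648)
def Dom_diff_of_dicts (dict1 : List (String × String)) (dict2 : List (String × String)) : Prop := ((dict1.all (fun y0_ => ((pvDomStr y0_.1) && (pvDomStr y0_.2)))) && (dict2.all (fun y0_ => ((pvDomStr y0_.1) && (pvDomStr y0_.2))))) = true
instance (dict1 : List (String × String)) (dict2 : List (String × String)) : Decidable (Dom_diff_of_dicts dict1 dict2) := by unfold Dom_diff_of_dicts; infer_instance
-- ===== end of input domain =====

-- B replaces A's select-into-a-new-dict strategy (two key sets, set subtraction, re-scan loop) by the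
-- dual copy-and-delete strategy: copy dict1 once and pop each key of dict2 from the copy (return value only).
-- A iterates a Python set whose hash order is not modelled; outputs are dicts, compared order-insensitively.

-- ===== PORT A =====
def diff_of_dicts (dict1 : List (String × String)) (dict2 : List (String × String)) : List (String × String) :=
  let d1 : PySem.Dict String String := PySem.Dict.ofList dict1
  let d2 : PySem.Dict String String := PySem.Dict.ofList dict2
  let set1 : PySem.Set String := PySem.Set.ofList d1.keys
  let set2 : PySem.Set String := PySem.Set.ofList d2.keys
  let diff : PySem.Set String := PySem.Set.diff set1 set2
  let diff_dict : PySem.Dict String String :=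
    diff.foldl
      (fun acc key =>
        if d1.contains key then acc.insert key ((d1.get? key).getD "") else acc)
      PySem.Dict.empty
  diff_dict.items

-- ===== PORT B =====
def diff_of_dicts_alt (dict1 : List (String × String)) (dict2 : List (String × String)) : List (String × String) :=
  let result : PySem.Dict String String := PySem.Dict.ofList dict1
  let d2 : PySem.Dict String String := PySem.Dict.ofList dict2
  (d2.keys.foldl (fun acc key => acc.erase key) result).items

-- ===== PRECONDITION & SPEC =====
def Spec_diff_of_dicts (dict1 : List (String × String)) (dict2 : List (String × String)) (out : List (String × String)) : Prop := out = diff_of_dicts_alt dict1 dict2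
instance (dict1 : List (String × String)) (dict2 : List (String × String)) (out : List (String × String)) : Decidable (Spec_diff_of_dicts dict1 dict2 out) := by unfold Spec_diff_of_dicts; infer_instance

-- ===== CLAIM (what is proved, stated in full; the proofs are below) =====
def Claim_equal_diff_of_dicts : Prop := ∀ (dict1 : List (String × String)) (dict2 : List (String × String)), Dom_diff_of_dicts dict1 dict2 → Spec_diff_of_dicts dict1 dict2 (diff_of_dicts dict1 dict2)

-- ===== LEMMAS AND PROOFS =====

-- membership test against set(d.keys()) agrees with 'key in d'
theorem setOfKeys_contains_eq {ν : Type} (d : PySem.Dict String ν) (x : String) :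
    (PySem.Set.ofList d.keys).contains x = d.contains x := by
  by_cases h : x ∈ d.keys
  · have h1 : (PySem.Set.ofList d.keys).contains x = true := by
      rw [PySem.Set.contains_iff, PySem.Set.mem_ofList]; exact h
    have h2 : d.contains x = true := (PySem.Dict.contains_iff_mem_keys d x).mpr h
    rw [h1, h2]
  · have h1 : ¬ (PySem.Set.ofList d.keys).contains x = true := by
      rw [PySem.Set.contains_iff, PySem.Set.mem_ofList]; exact h
    have h2 : ¬ d.contains x = true := fun hc => h ((PySem.Dict.contains_iff_mem_keys d x).mp hc)
    simp only [Bool.not_eq_true] at h1 h2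
    rw [h1, h2]

-- 'key in d' agrees with membership in the keys list
theorem dict_contains_eq_keys_contains {ν : Type} (d : PySem.Dict String ν) (x : String) :
    d.contains x = d.keys.contains x := by
  by_cases h : x ∈ d.keys
  · rw [(PySem.Dict.contains_iff_mem_keys d x).mpr h, (List.contains_iff_mem).mpr h]
  · have h2 : ¬ d.contains x = true := fun hc => h ((PySem.Dict.contains_iff_mem_keys d x).mp hc)
    have h3 : ¬ d.keys.contains x = true := fun hc => h (List.contains_iff_mem.mp hc)
    simp only [Bool.not_eq_true] at h2 h3
    rw [h2, h3]

-- erasing one key filters the item list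
theorem items_erase (d : PySem.Dict String String) (k : String) :
    (d.erase k).items = d.items.filter (fun p => !(p.1 == k)) := rfl

-- the deletion loop of B filters the item list by all the erased keys
theorem items_foldl_erase (l : List String) (d : PySem.Dict String String) :
    (l.foldl (fun acc key => acc.erase key) d).items
      = d.items.filter (fun p => !(l.contains p.1)) := by
  induction l generalizing d with
  | nil => simp
  | cons k t ih =>
    simp only [List.foldl_cons]
    rw [ih, items_erase, List.filter_filter]
    apply List.filter_congr
    intro p _
    simp only [List.contains_cons, Bool.not_or, Bool.and_comm]

-- A's port computes the filter of dict1's items by keys not in dict2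
theorem diff_of_dicts_eq_filter (dict1 dict2 : List (String × String)) :
    diff_of_dicts dict1 dict2
      = (PySem.Dict.ofList dict1).items.filter
          (fun kv => !(PySem.Dict.ofList dict2).contains kv.1) := by
  unfold diff_of_dicts
  simp only []
  set d1 : PySem.Dict String String := PySem.Dict.ofList dict1 with hd1
  set d2 : PySem.Dict String String := PySem.Dict.ofList dict2 with hd2
  have hnd1 : d1.keys.Nodup := PySem.Dict.nodup_keys_ofList dict1
  have hset1 : PySem.Set.ofList d1.keys = d1.keys :=
    PySem.Set.ofList_eq_self_of_nodup d1.keys hnd1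
  have hdiff : PySem.Set.diff (PySem.Set.ofList d1.keys) (PySem.Set.ofList d2.keys)
      = d1.keys.filter (fun x => !d2.contains x) := by
    show List.filter _ (PySem.Set.ofList d1.keys) = _
    rw [hset1]
    exact List.filter_congr (fun x _ => by rw [setOfKeys_contains_eq])
  rw [hdiff]
  have hmem : ∀ k ∈ d1.keys.filter (fun x => !d2.contains x), d1.contains k = true := by
    intro k hk
    exact (PySem.Dict.contains_iff_mem_keys d1 k).mpr (List.mem_of_mem_filter hk)
  have hcongr :
      List.foldl
        (fun (acc : PySem.Dict String String) key =>
          if d1.contains key then acc.insert key ((d1.get? key).getD "") else acc)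
        PySem.Dict.empty (d1.keys.filter (fun x => !d2.contains x))
      = List.foldl
        (fun (acc : PySem.Dict String String) key =>
          acc.insert key ((d1.get? key).getD ""))
        PySem.Dict.empty (d1.keys.filter (fun x => !d2.contains x)) := by
    apply PySem.List.foldl_congr_mem
    intro acc x hx
    rw [hmem x hx, if_pos rfl]
  rw [hcongr]
  have hfresh := PySem.Dict.items_foldl_insert_fresh
      (l := d1.keys.filter (fun x => !d2.contains x)) (k := fun k => k)
      (v := fun k => (d1.get? k).getD "") (d := PySem.Dict.empty)
      (by intro a _; exact PySem.Dict.contains_empty a)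
      (by rw [List.map_id']; exact hnd1.filter _)
  rw [hfresh]
  rw [PySem.Dict.items_eq_map_keys d1 hnd1 "", List.filter_map]
  simp only [PySem.Dict.getD_eq_get?_getD]
  rfl

-- ===== VERDICT (by name: the statement is the Claim_ definition above) =====
theorem diff_of_dicts_spec : Claim_equal_diff_of_dicts := by
  intro dict1 dict2 _
  unfold Spec_diff_of_dicts diff_of_dicts_alt
  rw [diff_of_dicts_eq_filter, items_foldl_erase]
  exact List.filter_congr (fun p _ => by
    rw [dict_contains_eq_keys_contains])
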